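-- pv_equiv track=rewrite | github.com/ForgottenHistory/HOI4-AI-Addon | streamer-tools/twitter-feed/stream_integration.py | _determine_avatar_type
-- ===== SOURCE A (Python) =====
-- def _determine_avatar_type(username: str) -> str:
--     """Determine avatar type based on username"""
--     username_lower = username.lower()
--
--     if any(leader in username_lower for leader in ['hitler', 'stalin', 'roosevelt', 'churchill', 'mussolini']):
--         return 'leader'
--     elif any(title in username_lower for title in ['minister', 'secretary', 'ambassador']):
--         return 'diplomat'
--     elif any(role in username_lower for role in ['correspondent', 'reporter', 'journalist', 'news']):
--         return 'journalist'
--     elif any(party in username_lower for party in ['party', 'communist', 'fascist', 'democratic']):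
--         return 'party'
--     else:
--         return 'citizen'
-- ===== SOURCE B (Python) =====
-- # Flat keyword->priority map folded to a minimum rank; no per-category branching or early return.
-- _KEYWORD_RANK = [
--     ('hitler', 0), ('stalin', 0), ('roosevelt', 0), ('churchill', 0), ('mussolini', 0),
--     ('minister', 1), ('secretary', 1), ('ambassador', 1),
--     ('correspondent', 2), ('reporter', 2), ('journalist', 2), ('news', 2),
--     ('party', 3), ('communist', 3), ('fascist', 3), ('democratic', 3),
-- ]
-- _TYPES = ['leader', 'diplomat', 'journalist', 'party', 'citizen']
--
-- def _determine_avatar_type(username: str) -> str: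
--     """Determine avatar type based on username"""
--     u = username.lower()
--     rank = 4
--     for kw, r in _KEYWORD_RANK:
--         if kw in u and r < rank:
--             rank = r
--     return _TYPES[rank]
-- ===== Notes on version B (the rewrite author's own statement) =====
-- stated objective: alternative
-- what changed: Instead of an if/elif chain over per-category keyword groups with short-circuit returns, B flattens all keywords into one (keyword, priority-rank) map, folds the whole list once keeping the minimum matching rank in an accumulator, and indexes a type table with the final rank.
import Mathlib
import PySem

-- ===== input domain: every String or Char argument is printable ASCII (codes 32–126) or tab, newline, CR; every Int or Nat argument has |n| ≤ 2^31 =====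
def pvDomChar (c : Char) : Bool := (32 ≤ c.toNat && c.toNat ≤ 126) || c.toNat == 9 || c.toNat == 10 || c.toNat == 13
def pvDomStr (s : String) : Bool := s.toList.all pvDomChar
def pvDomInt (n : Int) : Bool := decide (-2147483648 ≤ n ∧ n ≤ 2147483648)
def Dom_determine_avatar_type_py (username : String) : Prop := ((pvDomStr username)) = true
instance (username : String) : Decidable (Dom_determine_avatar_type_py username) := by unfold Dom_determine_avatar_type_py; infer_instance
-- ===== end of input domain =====

-- B replaces A's if/elif chain with one fold over a flat (keyword, priority-rank) map keeping the
-- minimum matching rank, then indexes a type table (objective: alternative decomposition).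

-- ===== PORT A =====
def determine_avatar_type_py (username : String) : String :=
  let username_lower := PySem.Str.lower username
  if (["hitler", "stalin", "roosevelt", "churchill", "mussolini"].any
      (fun leader => PySem.Str.isIn leader username_lower)) then "leader"
  else if (["minister", "secretary", "ambassador"].any
      (fun title => PySem.Str.isIn title username_lower)) then "diplomat"
  else if (["correspondent", "reporter", "journalist", "news"].any
      (fun role => PySem.Str.isIn role username_lower)) then "journalist"
  else if (["party", "communist", "fascist", "democratic"].any
      (fun party => PySem.Str.isIn party username_lower)) then "party"
  else "citizen"

-- ===== PORT B =====
def pvKeywordRank : List (String × Nat) :=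
  [("hitler", 0), ("stalin", 0), ("roosevelt", 0), ("churchill", 0), ("mussolini", 0),
   ("minister", 1), ("secretary", 1), ("ambassador", 1),
   ("correspondent", 2), ("reporter", 2), ("journalist", 2), ("news", 2),
   ("party", 3), ("communist", 3), ("fascist", 3), ("democratic", 3)]

def pvTypes : List String := ["leader", "diplomat", "journalist", "party", "citizen"]

def determine_avatar_type_py_alt (username : String) : String :=
  let u := PySem.Str.lower username
  let rank := pvKeywordRank.foldl
    (fun rank p => if PySem.Str.isIn p.1 u && decide (p.2 < rank) then p.2 else rank) 4
  -- _TYPES[rank]: rank is always 0..4, so plain in-range indexing (getD never hits its default)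
  pvTypes.getD rank "citizen"

-- ===== PRECONDITION & SPEC =====
def Spec_determine_avatar_type_py (username : String) (out : String) : Prop := out = determine_avatar_type_py_alt username
instance (username : String) (out : String) : Decidable (Spec_determine_avatar_type_py username out) := by unfold Spec_determine_avatar_type_py; infer_instance

-- ===== CLAIM (what is proved, stated in full; the proofs are below) =====
def Claim_equal_determine_avatar_type_py : Prop := ∀ (username : String), Dom_determine_avatar_type_py username → Spec_determine_avatar_type_py username (determine_avatar_type_py username)

-- ===== LEMMAS AND PROOFS =====

-- Folding one constant-rank group: the accumulator drops to r iff some keyword of the group matches.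
theorem pv_fold_group (u : String) (r : Nat) (kws : List String) (acc : Nat) :
    (kws.map (fun k => (k, r))).foldl
      (fun rank p => if PySem.Str.isIn p.1 u && decide (p.2 < rank) then p.2 else rank) acc
    = if kws.any (fun k => PySem.Str.isIn k u) && decide (r < acc) then r else acc := by
  induction kws generalizing acc with
  | nil => simp
  | cons k rest ih =>
    simp only [List.map_cons, List.foldl_cons, List.any_cons]
    by_cases hk : PySem.Str.isIn k u = true
    · by_cases hr : r < acc
      · simp only [hk, Bool.true_and, Bool.true_or, decide_eq_true hr, ih]
        simp
      · have : decide (r < acc) = false := decide_eq_false hr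
        simp only [hk, Bool.true_or, this, if_neg (Bool.false_ne_true), ih,
          Bool.and_false]
    · simp only [Bool.not_eq_true] at hk
      simp only [hk, Bool.false_and, Bool.false_or, if_neg (Bool.false_ne_true), ih]

-- ===== VERDICT (by name: the statement is the Claim_ definition above) =====
theorem determine_avatar_type_py_spec : Claim_equal_determine_avatar_type_py := by
  intro username _
  unfold Spec_determine_avatar_type_py determine_avatar_type_py determine_avatar_type_py_alt
  have hflat : pvKeywordRank =
      (["hitler", "stalin", "roosevelt", "churchill", "mussolini"].map (fun k => (k, 0)))
        ++ (["minister", "secretary", "ambassador"].map (fun k => (k, 1)))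
        ++ (["correspondent", "reporter", "journalist", "news"].map (fun k => (k, 2)))
        ++ (["party", "communist", "fascist", "democratic"].map (fun k => (k, 3))) := rfl
  rw [hflat]
  simp only [List.foldl_append, pv_fold_group]
  set u := PySem.Str.lower username
  by_cases c0 : (["hitler", "stalin", "roosevelt", "churchill", "mussolini"].any
      (fun k => PySem.Str.isIn k u)) = true <;>
  by_cases c1 : (["minister", "secretary", "ambassador"].any
      (fun k => PySem.Str.isIn k u)) = true <;>
  by_cases c2 : (["correspondent", "reporter", "journalist", "news"].any
      (fun k => PySem.Str.isIn k u)) = true <;>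
  by_cases c3 : (["party", "communist", "fascist", "democratic"].any
      (fun k => PySem.Str.isIn k u)) = true <;>
  simp only [c0, c1, c2, c3] <;>
  simp [pvTypes]
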